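-- pv_equiv track=rewrite | github.com/GeorgeTCecil/bnbsaver | web_searcher.py | filter_vacation_rental_sites
-- ===== SOURCE A (Python) =====
-- from typing import List, Dict, Set
--
-- def filter_vacation_rental_sites(results: List[Dict]) -> List[Dict]:
--     """
--     Filter to keep only known vacation rental sites and exclude aggregators/irrelevant sites.
--
--     Args:
--         results: List of search results
--
--     Returns:
--         Filtered list focusing on rental sites
--     """
--     # Common vacation rental platforms
--     rental_platforms = [
--         'vrbo.com', 'homeaway.com', 'booking.com', 'vacasa.com',
--         'flipkey.com', 'tripadvisor.com', 'expedia.com', 'hotels.com',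
--         'evolve.com', 'vacationrenter.com', 'tripping.com'
--     ]
--
--     # Sites to exclude
--     exclude = [
--         'airbnb.com', 'zillow.com', 'realtor.com', 'redfin.com',
--         'facebook.com', 'pinterest.com', 'instagram.com', 'youtube.com',
--         'reddit.com', 'twitter.com', 'linkedin.com'
--     ]
--
--     platform_results = []
--     other_results = []
--
--     for result in results:
--         url = result.get("link", "").lower()
--
--         # Skip excluded domains
--         if any(domain in url for domain in exclude):
--             continue
--
--         # Prioritize known rental platforms
--         if any(platform in url for platform in rental_platforms):
--             platform_results.append(result)
--         else:
--             # Keep other results (could be personal rental sites)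
--             other_results.append(result)
--
--     # Return platform results first, then others
--     return platform_results + other_results
-- ===== SOURCE B (Python) =====
-- from typing import List, Dict
--
--
-- def filter_vacation_rental_sites(results: List[Dict]) -> List[Dict]:
--     rental_platforms = [
--         'vrbo.com', 'homeaway.com', 'booking.com', 'vacasa.com',
--         'flipkey.com', 'tripadvisor.com', 'expedia.com', 'hotels.com',
--         'evolve.com', 'vacationrenter.com', 'tripping.com'
--     ]
--
--     exclude = [
--         'airbnb.com', 'zillow.com', 'realtor.com', 'redfin.com',
--         'facebook.com', 'pinterest.com', 'instagram.com', 'youtube.com',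
--         'reddit.com', 'twitter.com', 'linkedin.com'
--     ]
--
--     kept = [r for r in results
--             if not any(domain in r.get("link", "").lower() for domain in exclude)]
--
--     # Stable sort: platform matches (key 0) come first, everything else (key 1)
--     # after, each group keeping its original order.
--     return sorted(kept, key=lambda r: 0 if any(
--         p in r.get("link", "").lower() for p in rental_platforms) else 1)
-- ===== Notes on version B (the rewrite author's own statement) =====
-- stated objective: simpler
-- what changed: Replaces the manual two-accumulator partition loop with a filter comprehension that drops excluded links followed by a stable sort on a 0/1 platform-priority key; sort stability reproduces the platform-first ordering.
import Mathlib
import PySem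

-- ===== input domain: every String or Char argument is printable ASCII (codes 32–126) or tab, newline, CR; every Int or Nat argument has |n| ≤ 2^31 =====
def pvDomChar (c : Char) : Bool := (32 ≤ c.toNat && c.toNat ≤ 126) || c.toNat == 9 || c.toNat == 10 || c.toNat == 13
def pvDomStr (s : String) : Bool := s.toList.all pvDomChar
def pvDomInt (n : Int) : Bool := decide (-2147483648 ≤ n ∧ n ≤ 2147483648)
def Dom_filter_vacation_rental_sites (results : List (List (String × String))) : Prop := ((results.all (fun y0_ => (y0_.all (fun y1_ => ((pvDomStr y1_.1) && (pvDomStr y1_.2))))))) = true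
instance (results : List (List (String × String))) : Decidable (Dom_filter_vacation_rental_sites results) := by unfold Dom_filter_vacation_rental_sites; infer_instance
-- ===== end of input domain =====

-- B replaces A's manual two-accumulator partition loop by a filter comprehension plus a
-- stable sort on a 0/1 platform-priority key (same cost; simpler decomposition).

-- shared module constants (A's and B's literal lists)
def pvPlatforms : List String :=
  ["vrbo.com", "homeaway.com", "booking.com", "vacasa.com",
   "flipkey.com", "tripadvisor.com", "expedia.com", "hotels.com",
   "evolve.com", "vacationrenter.com", "tripping.com"]

def pvExclude : List String :=
  ["airbnb.com", "zillow.com", "realtor.com", "redfin.com",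
   "facebook.com", "pinterest.com", "instagram.com", "youtube.com",
   "reddit.com", "twitter.com", "linkedin.com"]

-- result.get("link", "").lower()
def pvUrl (r : List (String × String)) : String :=
  PySem.Str.lower (PySem.Dict.getD ⟨r⟩ "link" "")

-- ===== PORT A =====
def filter_vacation_rental_sites (results : List (List (String × String))) : List (List (String × String)) :=
  let st := results.foldl
    (fun (st : List (List (String × String)) × List (List (String × String))) result =>
      let url := pvUrl result
      if pvExclude.any (fun domain => PySem.Str.isIn domain url) then st
      else if pvPlatforms.any (fun platform => PySem.Str.isIn platform url) then
        (st.1 ++ [result], st.2)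
      else
        (st.1, st.2 ++ [result]))
    ([], [])
  st.1 ++ st.2

-- ===== PORT B =====
-- B's sort key: 0 if the link matches a rental platform, 1 otherwise
def pvKey (r : List (String × String)) : Int :=
  if pvPlatforms.any (fun p => PySem.Str.isIn p (pvUrl r)) then 0 else 1

def filter_vacation_rental_sites_alt (results : List (List (String × String))) : List (List (String × String)) :=
  let kept := results.filter
    (fun r => !(pvExclude.any (fun domain => PySem.Str.isIn domain (pvUrl r))))
  PySem.List.sorted kept pvKey

-- ===== PRECONDITION & SPEC =====
def Spec_filter_vacation_rental_sites (results : List (List (String × String))) (out : List (List (String × String))) : Prop := out = filter_vacation_rental_sites_alt results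
instance (results : List (List (String × String))) (out : List (List (String × String))) : Decidable (Spec_filter_vacation_rental_sites results out) := by unfold Spec_filter_vacation_rental_sites; infer_instance

-- ===== CLAIM (what is proved, stated in full; the proofs are below) =====
def Claim_equal_filter_vacation_rental_sites : Prop := ∀ (results : List (List (String × String))), Dom_filter_vacation_rental_sites results → Spec_filter_vacation_rental_sites results (filter_vacation_rental_sites results)

-- ===== LEMMAS AND PROOFS =====

lemma pvKey_zero_or_one (r : List (String × String)) : pvKey r = 0 ∨ pvKey r = 1 := by
  unfold pvKey; split <;> simp

-- inserting a key-0 element into a zeros-then-ones list lands at the end of the zeros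
lemma pv_insert_zero (x : List (String × String)) (A B : List (List (String × String)))
    (hA : ∀ a ∈ A, pvKey a = 0) (hB : ∀ b ∈ B, pvKey b = 1) (hx : pvKey x = 0) :
    PySem.List.insertBy (fun a b => decide (pvKey a < pvKey b)) x (A ++ B) = A ++ x :: B := by
  induction A with
  | nil =>
    cases B with
    | nil => simp [PySem.List.insertBy]
    | cons b bs => simp [PySem.List.insertBy, hx, hB b (by simp)]
  | cons a as ih =>
    have ha := hA a (by simp)
    simp only [List.cons_append, PySem.List.insertBy, hx, ha]
    simp only [show (decide ((0:Int) < 0)) = false by decide, Bool.false_eq_true, if_false]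
    simp [ih (fun a h => hA a (by simp [h]))]

-- inserting a key-1 element lands at the very end
lemma pv_insert_one (x : List (String × String)) (A B : List (List (String × String)))
    (hA : ∀ a ∈ A, pvKey a = 0) (hB : ∀ b ∈ B, pvKey b = 1) (hx : pvKey x = 1) :
    PySem.List.insertBy (fun a b => decide (pvKey a < pvKey b)) x (A ++ B) = A ++ (B ++ [x]) := by
  induction A with
  | nil =>
    induction B with
    | nil => simp [PySem.List.insertBy]
    | cons b bs ihb =>
      have hb := hB b (by simp)
      simp only [List.nil_append] at ihb ⊢
      simp [PySem.List.insertBy, hx, hb, ihb (fun b h => hB b (by simp [h]))]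
  | cons a as ih =>
    have ha := hA a (by simp)
    simp only [List.cons_append, PySem.List.insertBy, hx, ha]
    simp only [show (decide ((1:Int) < 0)) = false by decide, Bool.false_eq_true, if_false]
    simp [ih (fun a h => hA a (by simp [h]))]

-- the insertion-sort fold over a list, started from a zeros-then-ones state, partitions by key
lemma pv_foldl_insert (l : List (List (String × String))) :
    ∀ (P O : List (List (String × String))),
    (∀ a ∈ P, pvKey a = 0) → (∀ b ∈ O, pvKey b = 1) →
    l.foldl (fun acc x => PySem.List.insertBy (fun a b => decide (pvKey a < pvKey b)) x acc) (P ++ O)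
      = (P ++ l.filter (fun r => pvKey r == 0)) ++ (O ++ l.filter (fun r => !(pvKey r == 0))) := by
  induction l with
  | nil => intro P O _ _; simp
  | cons x xs ih =>
    intro P O hP hO
    rcases pvKey_zero_or_one x with hx | hx
    · have hP' : ∀ a ∈ P ++ [x], pvKey a = 0 := by
        intro a h
        rcases List.mem_append.mp h with h | h
        · exact hP a h
        · rw [List.mem_singleton.mp h]; exact hx
      have h1 : PySem.List.insertBy (fun a b => decide (pvKey a < pvKey b)) x (P ++ O)
          = (P ++ [x]) ++ O := by
        rw [pv_insert_zero x P O hP hO hx]; simp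
      simp only [List.foldl_cons, h1]
      rw [ih (P ++ [x]) O hP' hO]
      simp [hx]
    · have hO' : ∀ b ∈ O ++ [x], pvKey b = 1 := by
        intro b h
        rcases List.mem_append.mp h with h | h
        · exact hO b h
        · rw [List.mem_singleton.mp h]; exact hx
      have h1 : PySem.List.insertBy (fun a b => decide (pvKey a < pvKey b)) x (P ++ O)
          = P ++ (O ++ [x]) := pv_insert_one x P O hP hO hx
      simp only [List.foldl_cons, h1]
      rw [ih P (O ++ [x]) hP hO']
      have hx0 : (pvKey x == 0) = false := by simp [hx]
      simp [hx0]

-- A's accumulator loop computes the same partition of the kept elements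
lemma pv_foldl_A (l : List (List (String × String))) :
    ∀ (p o : List (List (String × String))),
    l.foldl
      (fun (st : List (List (String × String)) × List (List (String × String))) result =>
        let url := pvUrl result
        if pvExclude.any (fun domain => PySem.Str.isIn domain url) then st
        else if pvPlatforms.any (fun platform => PySem.Str.isIn platform url) then
          (st.1 ++ [result], st.2)
        else
          (st.1, st.2 ++ [result])) (p, o)
      = (p ++ ((l.filter (fun r => !(pvExclude.any (fun domain => PySem.Str.isIn domain (pvUrl r))))).filter
                 (fun r => pvKey r == 0)),
         o ++ ((l.filter (fun r => !(pvExclude.any (fun domain => PySem.Str.isIn domain (pvUrl r))))).filter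
                 (fun r => !(pvKey r == 0)))) := by
  induction l with
  | nil => intro p o; simp
  | cons x xs ih =>
    intro p o
    simp only [List.foldl_cons, List.filter_cons]
    by_cases hex : pvExclude.any (fun domain => PySem.Str.isIn domain (pvUrl x)) = true
    · simp only [hex, if_true, Bool.not_true, Bool.false_eq_true, if_false]
      exact ih p o
    · simp only [Bool.not_eq_true] at hex
      simp only [hex, Bool.false_eq_true, if_false, Bool.not_false, if_true]
      by_cases hpl : pvPlatforms.any (fun platform => PySem.Str.isIn platform (pvUrl x)) = true
      · have hk : pvKey x = 0 := by unfold pvKey; rw [hpl]; rfl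
        simp only [hpl, if_true, List.filter_cons, hk]
        rw [ih (p ++ [x]) o]
        simp
      · simp only [Bool.not_eq_true] at hpl
        have hk : pvKey x = 1 := by unfold pvKey; rw [hpl]; rfl
        have hk0 : (pvKey x == 0) = false := by simp [hk]
        simp only [hpl, Bool.false_eq_true, if_false, List.filter_cons, hk0, Bool.not_false,
          if_true]
        rw [ih p (o ++ [x])]
        simp

-- ===== VERDICT (by name: the statement is the Claim_ definition above) =====
theorem filter_vacation_rental_sites_spec : Claim_equal_filter_vacation_rental_sites := by
  intro results _
  unfold Spec_filter_vacation_rental_sites filter_vacation_rental_sites filter_vacation_rental_sites_alt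
  rw [PySem.List.sorted_eq_foldl_insertBy]
  have hB := pv_foldl_insert
    (results.filter (fun r => !(pvExclude.any (fun domain => PySem.Str.isIn domain (pvUrl r)))))
    [] [] (by intro a h; simp at h) (by intro b h; simp at h)
  simp only [List.nil_append] at hB
  rw [hB, pv_foldl_A results [] []]
  simp
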